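-- pv_equiv track=rewrite | github.com/pypi-data/pypi-mirror-402 | packages/gitlint-rai/gitlint_rai-0.1.5.tar.gz/gitlint_rai-0.1.5/gitlint_rai/rules.py | _find_trailer_block
-- ===== SOURCE A (Python) =====
-- def _find_trailer_block(lines):
--     """Return a list of trailer lines in correct order (top-down).
--
--     Trailers are defined as an unbroken block of non-empty lines at the
--     end of the message. This returns [] if no such block exists.
--     """
--     if not lines:
--         return []
--
--     last_non_empty = None
--     for idx in range(len(lines) - 1, -1, -1):
--         if lines[idx].strip():
--             last_non_empty = idx
--             break
--
--     if last_non_empty is None: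
--         return []
--
--     raw = []
--     for idx in range(last_non_empty, -1, -1):
--         line = lines[idx].strip()
--         if not line:
--             break
--         raw.append(line)
--
--     raw.reverse()
--     return raw
-- ===== SOURCE B (Python) =====
-- def _find_trailer_block(lines):
--     """Single forward pass: keep the current run of non-blank (stripped) lines;
--     remember the most recently completed run; the last run wins."""
--     current = []
--     result = []
--     for line in lines:
--         s = line.strip()
--         if s:
--             current.append(s)
--         elif current:
--             result = current
--             current = []
--     if current:
--         result = current
--     return result
-- ===== Notes on version B (the rewrite author's own statement) =====
-- stated objective: alternative
-- what changed: Replaced A's backward locate-the-last-non-empty-index pass plus backward collect-until-blank pass (with reverse) by a single forward fold that maintains the current non-blank run and the most recently completed run.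
import Mathlib
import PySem

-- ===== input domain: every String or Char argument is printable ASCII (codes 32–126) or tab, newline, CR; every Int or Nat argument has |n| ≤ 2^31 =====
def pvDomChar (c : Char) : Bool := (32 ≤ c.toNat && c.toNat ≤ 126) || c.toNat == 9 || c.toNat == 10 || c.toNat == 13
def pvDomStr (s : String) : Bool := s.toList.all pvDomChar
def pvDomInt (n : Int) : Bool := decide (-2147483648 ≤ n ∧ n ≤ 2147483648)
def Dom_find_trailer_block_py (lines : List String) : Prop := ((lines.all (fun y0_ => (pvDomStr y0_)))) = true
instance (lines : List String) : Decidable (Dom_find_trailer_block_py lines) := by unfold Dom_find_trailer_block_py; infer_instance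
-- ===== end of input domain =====

-- B replaces A's two backward scans by one forward fold keeping the current and the last completed non-blank run (alternative decomposition, same cost).

-- ===== PORT A =====
-- second loop of A ('for idx in range(last,-1,-1): … break …'); pyGet? is always in range here, getD "" is never taken
def pvRawLoopA (lines : List String) : List Int → List String
  | [] => []
  | idx :: rest =>
    let line := PySem.Str.strip ((PySem.List.pyGet? lines idx).getD "")
    if line = "" then []
    else line :: pvRawLoopA lines rest

def find_trailer_block_py (lines : List String) : List String :=
  if lines = [] then []
  else
    let last_non_empty :=
      (PySem.List.pyRange ((lines.length : Int) - 1) (-1) (-1)).find?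
        (fun idx => !(PySem.Str.strip ((PySem.List.pyGet? lines idx).getD "") == ""))
    match last_non_empty with
    | none => []
    | some last => (pvRawLoopA lines (PySem.List.pyRange last (-1) (-1))).reverse

-- ===== PORT B =====
def pvAltStep (st : List String × List String) (line : String) : List String × List String :=
  let s := PySem.Str.strip line
  if s ≠ "" then (st.1 ++ [s], st.2)
  else if st.1 ≠ [] then ([], st.1)
  else st

def find_trailer_block_py_alt (lines : List String) : List String :=
  let st := lines.foldl pvAltStep ([], [])
  if st.1 ≠ [] then st.1 else st.2

-- ===== PRECONDITION & SPEC =====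
def Spec_find_trailer_block_py (lines : List String) (out : List String) : Prop := out = find_trailer_block_py_alt lines
instance (lines : List String) (out : List String) : Decidable (Spec_find_trailer_block_py lines out) := by unfold Spec_find_trailer_block_py; infer_instance

-- ===== CLAIM (what is proved, stated in full; the proofs are below) =====
def Claim_equal_find_trailer_block_py : Prop := ∀ (lines : List String), Dom_find_trailer_block_py lines → Spec_find_trailer_block_py lines (find_trailer_block_py lines)

-- ===== LEMMAS AND PROOFS =====

-- trailing non-blank (stripped) run of l, top-down
def pvTr (l : List String) : List String :=
  ((l.map PySem.Str.strip).reverse.takeWhile (fun s => !(s == ""))).reverse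

-- last non-blank run of l (ignoring trailing blanks), top-down: the common specification
def pvSpec (l : List String) : List String :=
  (((l.map PySem.Str.strip).reverse.dropWhile (fun s => s == "")).takeWhile (fun s => !(s == ""))).reverse

theorem pvTr_append (l : List String) (x : String) :
    pvTr (l ++ [x]) = if PySem.Str.strip x = "" then [] else pvTr l ++ [PySem.Str.strip x] := by
  by_cases h : PySem.Str.strip x = ""
  · simp [pvTr, h]
  · have hb : (PySem.Str.strip x == "") = false := by simp [h]
    simp [pvTr, h, hb]

theorem pvSpec_append (l : List String) (x : String) :
    pvSpec (l ++ [x]) =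
      if PySem.Str.strip x = "" then pvSpec l else pvTr l ++ [PySem.Str.strip x] := by
  by_cases h : PySem.Str.strip x = ""
  · simp [pvSpec, h]
  · have hb : (PySem.Str.strip x == "") = false := by simp [h]
    simp [pvSpec, pvTr, h, hb]

theorem pvSpec_of_tr_ne (l : List String) (h : pvTr l ≠ []) : pvSpec l = pvTr l := by
  have h' : (l.map PySem.Str.strip).reverse.takeWhile (fun s => !(s == "")) ≠ [] := by
    intro he
    exact h (by rw [pvTr, he, List.reverse_nil])
  rw [pvSpec, pvTr]
  cases hr : (l.map PySem.Str.strip).reverse with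
  | nil => rw [hr] at h'; simp at h'
  | cons s t =>
    rw [hr] at h'
    cases hs : (s == "") with
    | true => rw [List.takeWhile_cons, hs] at h'; simp at h'
    | false => rw [List.dropWhile_cons, hs]; simp

theorem pvFind?_congr {α : Type} (p q : α → Bool) (l : List α)
    (h : ∀ a ∈ l, p a = q a) : l.find? p = l.find? q := by
  induction l with
  | nil => rfl
  | cons a t ih =>
    have ha := h a (by simp)
    rw [List.find?, List.find?, ha]
    cases q a with
    | true => rfl
    | false => exact ih (fun b hb => h b (by simp [hb]))

theorem pvGet_append (l : List String) (x : String) (j : Int) (h0 : 0 ≤ j) (h1 : j < l.length) :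
    PySem.List.pyGet? (l ++ [x]) j = PySem.List.pyGet? l j := by
  obtain ⟨k, rfl⟩ := Int.eq_ofNat_of_zero_le h0
  rw [PySem.List.pyGet?_natCast, PySem.List.pyGet?_natCast]
  exact List.getElem?_append_left (by exact_mod_cast h1)

theorem pvGet_last (l : List String) (x : String) :
    PySem.List.pyGet? (l ++ [x]) (((l ++ [x]).length : Int) - 1) = some x := by
  have he : (((l ++ [x]).length : Int) - 1) = ((l.length : Nat) : Int) := by simp
  rw [he, PySem.List.pyGet?_natCast]
  simp

theorem pvRawLoopA_congr (l l' : List String) (js : List Int)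
    (h : ∀ j ∈ js, PySem.List.pyGet? l j = PySem.List.pyGet? l' j) :
    pvRawLoopA l js = pvRawLoopA l' js := by
  induction js with
  | nil => rfl
  | cons j t ih =>
    rw [pvRawLoopA, pvRawLoopA, h j (by simp)]
    have ht := ih (fun b hb => h b (by simp [hb]))
    split_ifs <;> simp [ht]

theorem pvRawLoopA_tr (l : List String) :
    (pvRawLoopA l (PySem.List.pyRange ((l.length : Int) - 1) (-1) (-1))).reverse = pvTr l := by
  induction l using List.reverseRecOn with
  | nil =>
    rw [PySem.List.pyRange_neg_one_eq_nil (by norm_num)]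
    simp [pvRawLoopA, pvTr]
  | append_singleton l x ih =>
    rw [PySem.List.pyRange_neg_one_cons (by simp; omega)]
    rw [pvRawLoopA, pvGet_last l x]
    simp only [Option.getD_some]
    by_cases hsx : PySem.Str.strip x = ""
    · rw [if_pos hsx, pvTr_append, if_pos hsx, List.reverse_nil]
    · rw [if_neg hsx]
      have hrange : (((l ++ [x]).length : Int) - 1) - 1 = (l.length : Int) - 1 := by simp
      have hcongr : pvRawLoopA (l ++ [x]) (PySem.List.pyRange ((l.length : Int) - 1) (-1) (-1))
          = pvRawLoopA l (PySem.List.pyRange ((l.length : Int) - 1) (-1) (-1)) := by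
        apply pvRawLoopA_congr
        intro j hj
        rw [PySem.List.mem_pyRange_neg_one] at hj
        exact pvGet_append l x j (by omega) (by omega)
      rw [hrange, hcongr, List.reverse_cons, ih, pvTr_append, if_neg hsx]

theorem pvA_spec (l : List String) : find_trailer_block_py l = pvSpec l := by
  induction l using List.reverseRecOn with
  | nil => rw [find_trailer_block_py, if_pos rfl, pvSpec]; simp
  | append_singleton l x ih =>
    rw [find_trailer_block_py, if_neg (by simp)]
    rw [PySem.List.pyRange_neg_one_cons (by simp; omega)]
    rw [List.find?, pvGet_last l x]
    simp only [Option.getD_some]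
    by_cases hsx : PySem.Str.strip x = ""
    · -- last line blank: A(l++[x]) computes exactly what A l computes; spec also unchanged
      have hb : (!(PySem.Str.strip x == "")) = false := by simp [hsx]
      rw [hb]
      have hrange : (((l ++ [x]).length : Int) - 1) - 1 = (l.length : Int) - 1 := by simp
      rw [hrange]
      have hfind : (PySem.List.pyRange ((l.length : Int) - 1) (-1) (-1)).find?
            (fun idx => !(PySem.Str.strip ((PySem.List.pyGet? (l ++ [x]) idx).getD "") == ""))
          = (PySem.List.pyRange ((l.length : Int) - 1) (-1) (-1)).find?
            (fun idx => !(PySem.Str.strip ((PySem.List.pyGet? l idx).getD "") == "")) := by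
        apply pvFind?_congr
        intro j hj
        rw [PySem.List.mem_pyRange_neg_one] at hj
        rw [pvGet_append l x j (by omega) (by omega)]
      rw [hfind, pvSpec_append, if_pos hsx, ← ih, find_trailer_block_py]
      rcases hfound : (PySem.List.pyRange ((l.length : Int) - 1) (-1) (-1)).find?
            (fun idx => !(PySem.Str.strip ((PySem.List.pyGet? l idx).getD "") == "")) with _ | last
      · cases l <;> simp
      · have hl : l ≠ [] := by
          rintro rfl
          rw [PySem.List.pyRange_neg_one_eq_nil (by norm_num)] at hfound
          simp at hfound
        rw [if_neg hl]
        show (pvRawLoopA (l ++ [x]) (PySem.List.pyRange last (-1) (-1))).reverse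
            = (pvRawLoopA l (PySem.List.pyRange last (-1) (-1))).reverse
        have hmem := List.mem_of_find?_eq_some hfound
        rw [PySem.List.mem_pyRange_neg_one] at hmem
        congr 1
        apply pvRawLoopA_congr
        intro j hj
        rw [PySem.List.mem_pyRange_neg_one] at hj
        exact pvGet_append l x j (by omega) (by omega)
    · -- last line non-blank: the first loop stops at the end; the second loop is the trailing run
      have hb : (!(PySem.Str.strip x == "")) = true := by simp [hsx]
      rw [hb]
      show (pvRawLoopA (l ++ [x])
          (PySem.List.pyRange (((l ++ [x]).length : Int) - 1) (-1) (-1))).reverse = _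
      rw [pvRawLoopA_tr (l ++ [x]), pvSpec_append, if_neg hsx, pvTr_append, if_neg hsx]

theorem pvFoldB (l : List String) :
    (l.foldl pvAltStep ([], [])).1 = pvTr l ∧
      (pvTr l = [] → (l.foldl pvAltStep ([], [])).2 = pvSpec l) := by
  induction l using List.reverseRecOn with
  | nil => constructor <;> simp [pvTr, pvSpec]
  | append_singleton l x ih =>
    obtain ⟨ih1, ih2⟩ := ih
    rw [List.foldl_append, List.foldl_cons, List.foldl_nil]
    by_cases hsx : PySem.Str.strip x = ""
    · rw [pvAltStep]
      simp only [hsx, ne_eq, not_true_eq_false, if_false]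
      by_cases hc : (l.foldl pvAltStep ([], [])).1 = []
      · rw [if_neg (by simp [hc])]
        refine ⟨by rw [hc, pvTr_append, if_pos hsx], ?_⟩
        intro _
        rw [pvSpec_append, if_pos hsx]
        exact ih2 (ih1 ▸ hc)
      · rw [if_pos (by simp [hc])]
        refine ⟨by rw [pvTr_append, if_pos hsx], ?_⟩
        intro _
        have htr : pvTr l ≠ [] := ih1 ▸ hc
        rw [pvSpec_append, if_pos hsx, pvSpec_of_tr_ne l htr, ← ih1]
    · rw [pvAltStep]
      simp only [hsx, ne_eq, not_false_eq_true, if_true]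
      refine ⟨by rw [ih1, pvTr_append, if_neg hsx], ?_⟩
      intro h
      rw [pvTr_append, if_neg hsx] at h
      simp at h

theorem pvB_spec (l : List String) : find_trailer_block_py_alt l = pvSpec l := by
  obtain ⟨h1, h2⟩ := pvFoldB l
  rw [find_trailer_block_py_alt]
  by_cases hc : (l.foldl pvAltStep ([], [])).1 = []
  · simp only [hc, ne_eq, not_true_eq_false, if_false]
    exact h2 (h1 ▸ hc)
  · simp only [ne_eq, hc, not_false_eq_true, if_true]
    rw [h1, pvSpec_of_tr_ne l (h1 ▸ hc)]

-- ===== VERDICT (by name: the statement is the Claim_ definition above) =====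
theorem find_trailer_block_py_spec : Claim_equal_find_trailer_block_py := by
  intro lines _
  unfold Spec_find_trailer_block_py
  rw [pvA_spec, pvB_spec]
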